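-- pv_equiv track=rewrite | github.com/ayay129/ASREvalPlatform | backend/dataset_loader.py | _resolve_text_columns
-- ===== SOURCE A (Python) =====
-- from typing import List, Tuple, Optional
--
-- REF_COLUMNS = {'transcription', 'reference', 'ref', 'ground_truth', 'gt', 'label', 'sentence'}
--
-- HYP_COLUMNS = {'predicted_string', 'prediction', 'pred', 'hypothesis', 'hyp', 'asr_output'}
--
-- def _resolve_text_columns(fieldnames: List[str]) -> Tuple[str, str]:
--     """在列名列表里定位 reference / hypothesis 两列。"""
--     ref_col = None
--     hyp_col = None
--
--     for col in fieldnames: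
--         col_lower = col.strip().lower()
--         if ref_col is None and col_lower in REF_COLUMNS:
--             ref_col = col
--         elif hyp_col is None and col_lower in HYP_COLUMNS:
--             hyp_col = col
--
--     if ref_col is None:
--         raise ValueError(
--             f"找不到参考文本列。CSV/HF 列名: {fieldnames}。"
--             f"需要以下之一: {sorted(REF_COLUMNS)}"
--         )
--     if hyp_col is None:
--         raise ValueError(
--             f"找不到预测文本列。CSV/HF 列名: {fieldnames}。"
--             f"需要以下之一: {sorted(HYP_COLUMNS)}"
--         )
--
--     return ref_col, hyp_col
-- ===== SOURCE B (Python) =====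
-- from typing import List, Tuple
--
-- REF_COLUMNS = {'transcription', 'reference', 'ref', 'ground_truth', 'gt', 'label', 'sentence'}
--
-- HYP_COLUMNS = {'predicted_string', 'prediction', 'pred', 'hypothesis', 'hyp', 'asr_output'}
--
-- def _resolve_text_columns(fieldnames: List[str]) -> Tuple[str, str]:
--     """Build an inverted index canonical-name -> first position, then look the
--     candidate names up and take the earliest position for each role."""
--     first = {}
--     for i, col in enumerate(fieldnames):
--         first.setdefault(col.strip().lower(), i)
--
--     ref_is = [first[k] for k in REF_COLUMNS if k in first]
--     hyp_is = [first[k] for k in HYP_COLUMNS if k in first]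
--
--     if not ref_is:
--         raise ValueError(
--             f"找不到参考文本列。CSV/HF 列名: {fieldnames}。"
--             f"需要以下之一: {sorted(REF_COLUMNS)}"
--         )
--     if not hyp_is:
--         raise ValueError(
--             f"找不到预测文本列。CSV/HF 列名: {fieldnames}。"
--             f"需要以下之一: {sorted(HYP_COLUMNS)}"
--         )
--
--     return fieldnames[min(ref_is)], fieldnames[min(hyp_is)]
-- ===== Notes on version B (the rewrite author's own statement) =====
-- stated objective: alternative
-- what changed: Replaces A's single stateful scan with interleaved elif branches by an inverted index: one pass builds a dict canonical-name -> first position (setdefault), then each role's candidate names are looked up in the dict and the earliest position wins; correct because the two candidate sets are disjoint and the first match overall is the occurrence with minimal index.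
import Mathlib
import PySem

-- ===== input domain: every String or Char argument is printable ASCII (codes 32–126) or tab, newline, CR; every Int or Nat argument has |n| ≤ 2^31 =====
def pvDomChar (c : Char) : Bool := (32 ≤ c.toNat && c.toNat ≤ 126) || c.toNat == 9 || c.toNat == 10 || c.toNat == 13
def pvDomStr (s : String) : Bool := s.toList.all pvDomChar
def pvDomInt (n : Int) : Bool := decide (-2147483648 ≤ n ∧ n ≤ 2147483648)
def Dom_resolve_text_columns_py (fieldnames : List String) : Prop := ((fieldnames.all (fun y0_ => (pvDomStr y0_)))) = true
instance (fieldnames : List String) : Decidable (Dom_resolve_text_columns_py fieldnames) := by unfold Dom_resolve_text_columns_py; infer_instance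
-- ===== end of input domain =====

-- B replaces A's single stateful elif-loop by an inverted index (canonical name -> first position,
-- built with setdefault) queried once per candidate name, taking the minimal position per role;
-- both raise ValueError when a column is missing (those inputs are outside Pre_).

-- ===== PORT A =====
-- Python sets REF_COLUMNS / HYP_COLUMNS, used only for membership tests
def pvRefCols : List String := ["transcription", "reference", "ref", "ground_truth", "gt", "label", "sentence"]
def pvHypCols : List String := ["predicted_string", "prediction", "pred", "hypothesis", "hyp", "asr_output"]

-- col.strip().lower()
def pvCanon (c : String) : String := PySem.Str.lower (PySem.Str.strip c)

def pvIsRef (c : String) : Bool := pvRefCols.contains (pvCanon c)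
def pvIsHyp (c : String) : Bool := pvHypCols.contains (pvCanon c)

-- A's loop: state (ref_col, hyp_col), branches in A's order
def pvStepA (st : Option String × Option String) (col : String) : Option String × Option String :=
  if st.1.isNone && pvIsRef col then (some col, st.2)
  else if st.2.isNone && pvIsHyp col then (st.1, some col)
  else st

def resolve_text_columns_py (fieldnames : List String) : String × String :=
  let st := fieldnames.foldl pvStepA (none, none)
  -- A raises ValueError when ref_col or hyp_col is None; those inputs are excluded by Pre_
  (st.1.getD "", st.2.getD "")

-- ===== PORT B =====
-- first = {}; for i, col in enumerate(fieldnames): first.setdefault(col.strip().lower(), i)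
def pvFirstIdx (fieldnames : List String) : PySem.Dict String Int :=
  (PySem.List.enumerate fieldnames 0).foldl
    (fun d p => PySem.Dict.setdefault d (pvCanon p.2) p.1) PySem.Dict.empty

def resolve_text_columns_py_alt (fieldnames : List String) : String × String :=
  let first := pvFirstIdx fieldnames
  let ref_is := pvRefCols.filterMap (fun k => first.get? k)
  let hyp_is := pvHypCols.filterMap (fun k => first.get? k)
  -- B raises ValueError when ref_is or hyp_is is empty; those inputs are excluded by Pre_
  match PySem.List.min? ref_is (fun x => x), PySem.List.min? hyp_is (fun x => x) with
  | some ri, some hi => (PySem.List.pyGetD fieldnames ri "", PySem.List.pyGetD fieldnames hi "")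
  | _, _ => ("", "")

-- ===== PRECONDITION & SPEC =====
-- Pre_ excludes exactly the inputs on which both A and B raise ValueError: fieldnames must
-- contain a reference-named column and a hypothesis-named column.
def Pre_resolve_text_columns_py (fieldnames : List String) : Prop :=
  (∃ c ∈ fieldnames, pvIsRef c = true) ∧ (∃ c ∈ fieldnames, pvIsHyp c = true)
instance (fieldnames : List String) : Decidable (Pre_resolve_text_columns_py fieldnames) := by unfold Pre_resolve_text_columns_py; infer_instance

def pvWitness_resolve_text_columns_py : List String := ["Ref ", "extra", "hyp"]

def Spec_resolve_text_columns_py (fieldnames : List String) (out : String × String) : Prop := out = resolve_text_columns_py_alt fieldnames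
instance (fieldnames : List String) (out : String × String) : Decidable (Spec_resolve_text_columns_py fieldnames out) := by unfold Spec_resolve_text_columns_py; infer_instance

-- ===== CLAIM (what is proved, stated in full; the proofs are below) =====
def Claim_equal_resolve_text_columns_py : Prop := ∀ (fieldnames : List String), Dom_resolve_text_columns_py fieldnames → Pre_resolve_text_columns_py fieldnames → Spec_resolve_text_columns_py fieldnames (resolve_text_columns_py fieldnames)

-- ===== LEMMAS AND PROOFS =====

-- REF_COLUMNS and HYP_COLUMNS are disjoint: no canonical name is in both
theorem pvRef_hyp_disjoint (c : String) (h : pvIsRef c = true) : pvIsHyp c = false := by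
  unfold pvIsRef at h
  unfold pvIsHyp
  generalize pvCanon c = t at h ⊢
  simp [pvRefCols, List.contains_eq_mem] at h
  rcases h with h | h | h | h | h | h | h <;> subst h <;> decide

-- A's fold computes the two independent first matches
theorem pvFoldA_eq_find (l : List String) (r h : Option String) :
    l.foldl pvStepA (r, h) = (r.or (l.find? pvIsRef), h.or (l.find? pvIsHyp)) := by
  induction l generalizing r h with
  | nil => simp
  | cons x xs ih =>
    by_cases hr : pvIsRef x = true
    · have hh : pvIsHyp x = false := pvRef_hyp_disjoint x hr
      cases r with
      | none =>
        have hstep : pvStepA (none, h) x = (some x, h) := by simp [pvStepA, hr]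
        rw [List.foldl_cons, hstep, ih]
        simp [hr, hh]
      | some rv =>
        have hstep : pvStepA (some rv, h) x = (some rv, h) := by
          cases h <;> simp [pvStepA, hr, hh]
        rw [List.foldl_cons, hstep, ih]
        simp [hr, hh]
    · have hr' : pvIsRef x = false := by simpa using hr
      by_cases hh : pvIsHyp x = true
      · cases h with
        | none =>
          have hstep : pvStepA (r, none) x = (r, some x) := by simp [pvStepA, hr', hh]
          rw [List.foldl_cons, hstep, ih]
          simp [hr', hh]
        | some hv =>
          have hstep : pvStepA (r, some hv) x = (r, some hv) := by simp [pvStepA, hr']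
          rw [List.foldl_cons, hstep, ih]
          simp [hr', hh]
      · have hh' : pvIsHyp x = false := by simpa using hh
        have hstep : pvStepA (r, h) x = (r, h) := by simp [pvStepA, hr', hh']
        rw [List.foldl_cons, hstep, ih]
        simp [hr', hh']

-- the inverted index stores, for each key, the position of its FIRST occurrence
theorem pvFirstIdx_get (l : List String) (s : Int) (d : PySem.Dict String Int) (k : String) :
    ((PySem.List.enumerate l s).foldl
        (fun d p => PySem.Dict.setdefault d (pvCanon p.2) p.1) d).get? k
      = (d.get? k).or ((l.findIdx? (fun c => pvCanon c == k)).map (fun (j : Nat) => s + (j : Int))) := by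
  induction l generalizing s d with
  | nil => simp [PySem.List.enumerate_nil]
  | cons x xs ih =>
    rw [PySem.List.enumerate_cons, List.foldl_cons, ih]
    by_cases hk : pvCanon x = k
    · subst hk
      rw [List.findIdx?_cons, if_pos (by simp), PySem.Dict.get?_setdefault_self]
      cases hdk : d.get? (pvCanon x) <;> simp
    · have hne : k ≠ pvCanon x := fun h => hk h.symm
      have hd' : (PySem.Dict.setdefault d (pvCanon x) s).get? k = d.get? k := by
        by_cases hc : d.contains (pvCanon x)
        · rw [PySem.Dict.setdefault_of_contains d s hc]
        · rw [PySem.Dict.setdefault_of_not_contains d s (by simpa using hc),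
              PySem.Dict.get?_insert, if_neg hne]
      have hmap : (List.findIdx? (fun c => pvCanon c == k) (x :: xs)).map (fun (j : Nat) => s + (j : Int))
          = (xs.findIdx? (fun c => pvCanon c == k)).map (fun (j : Nat) => (s + 1) + (j : Int)) := by
        rw [List.findIdx?_cons, if_neg (by simp [hk])]
        cases hfi : xs.findIdx? (fun c => pvCanon c == k) with
        | none => simp
        | some j =>
          simp
          omega
      rw [hd', hmap]

-- B's minimal index over a candidate set IS the index of A's first match for that set
theorem pvMin_eq (fs cols : List String)
    (hex : ∃ c ∈ fs, cols.contains (pvCanon c) = true) :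
    ∃ (i : Nat) (hi : i < fs.length),
      fs.find? (fun c => cols.contains (pvCanon c)) = some fs[i] ∧
      PySem.List.min? (cols.filterMap (fun k => (pvFirstIdx fs).get? k)) (fun x => x)
        = some ((i : Int)) := by
  cases hfi : fs.findIdx? (fun c => cols.contains (pvCanon c)) with
  | none =>
    exfalso
    obtain ⟨c, hc, hpc⟩ := hex
    rw [List.findIdx?_eq_none_iff] at hfi
    exact absurd hpc (by simpa using hfi c hc)
  | some i =>
    obtain ⟨hi, hpi, hmin⟩ := List.findIdx?_eq_some_iff_getElem.mp hfi
    refine ⟨i, hi, ?_, ?_⟩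
    · rw [List.find?_eq_some_iff_getElem]
      exact ⟨hpi, i, hi, rfl, fun j hj => by simpa using hmin j hj⟩
    · have hget : ∀ k, (pvFirstIdx fs).get? k
          = (fs.findIdx? (fun c => pvCanon c == k)).map (fun (j : Nat) => (j : Int)) := by
        intro k
        unfold pvFirstIdx
        rw [pvFirstIdx_get, PySem.Dict.get?_empty, Option.none_or]
        simp only [zero_add]
      have hk0mem : pvCanon fs[i] ∈ cols := by simpa [List.contains_eq_mem] using hpi
      have hfk0 : fs.findIdx? (fun c => pvCanon c == pvCanon fs[i]) = some i := by
        cases hfj : fs.findIdx? (fun c => pvCanon c == pvCanon fs[i]) with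
        | none =>
          rw [List.findIdx?_eq_none_iff] at hfj
          exact absurd (hfj fs[i] (List.getElem_mem hi)) (by simp)
        | some j =>
          obtain ⟨hj, hpj, hjmin⟩ := List.findIdx?_eq_some_iff_getElem.mp hfj
          have hpfj : cols.contains (pvCanon fs[j]) = true := by
            have hcan : pvCanon fs[j] = pvCanon fs[i] := by simpa using hpj
            rw [hcan]; simpa [List.contains_eq_mem] using hk0mem
          have h1 : i ≤ j := by
            by_contra hlt
            push Not at hlt
            exact (hmin j hlt) hpfj
          have h2 : j ≤ i := by
            by_contra hlt
            push Not at hlt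
            exact (hjmin i hlt) (by simp)
          have : j = i := le_antisymm h2 h1
          rw [this]
      have himem : ((i : Int)) ∈ cols.filterMap (fun k => (pvFirstIdx fs).get? k) := by
        rw [List.mem_filterMap]
        exact ⟨pvCanon fs[i], hk0mem, by rw [hget, hfk0]; rfl⟩
      have hge : ∀ v ∈ cols.filterMap (fun k => (pvFirstIdx fs).get? k), (i : Int) ≤ v := by
        intro v hv
        rw [List.mem_filterMap] at hv
        obtain ⟨k, hkc, hkv⟩ := hv
        rw [hget] at hkv
        cases hfj : fs.findIdx? (fun c => pvCanon c == k) with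
        | none => rw [hfj] at hkv; simp at hkv
        | some j =>
          rw [hfj] at hkv
          simp only [Option.map_some, Option.some_inj] at hkv
          obtain ⟨hj, hpj, _⟩ := List.findIdx?_eq_some_iff_getElem.mp hfj
          have hpfj : cols.contains (pvCanon fs[j]) = true := by
            have hcan : pvCanon fs[j] = k := by simpa using hpj
            rw [hcan]; simpa [List.contains_eq_mem] using hkc
          have hij : i ≤ j := by
            by_contra hlt
            push Not at hlt
            exact (hmin j hlt) hpfj
          rw [← hkv]
          exact_mod_cast hij
      cases hm : PySem.List.min? (cols.filterMap (fun k => (pvFirstIdx fs).get? k)) (fun x => x) with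
      | none =>
        rw [PySem.List.min?_eq_none_iff] at hm
        rw [hm] at himem
        simp at himem
      | some m =>
        have h1 := PySem.List.min?_isMin hm _ himem
        have h2 := hge m (PySem.List.min?_mem hm)
        rw [le_antisymm h1 h2]

-- ===== VERDICT (by name: the statement is the Claim_ definition above) =====
theorem resolve_text_columns_py_spec : Claim_equal_resolve_text_columns_py := by
  intro fieldnames _ hpre
  obtain ⟨hexr, hexh⟩ := hpre
  have hexr' : ∃ c ∈ fieldnames, pvRefCols.contains (pvCanon c) = true := by
    simpa [pvIsRef] using hexr
  have hexh' : ∃ c ∈ fieldnames, pvHypCols.contains (pvCanon c) = true := by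
    simpa [pvIsHyp] using hexh
  obtain ⟨ir, hir, hfindr, hminr⟩ := pvMin_eq fieldnames pvRefCols hexr'
  obtain ⟨ih2, hih, hfindh, hminh⟩ := pvMin_eq fieldnames pvHypCols hexh'
  unfold Spec_resolve_text_columns_py resolve_text_columns_py resolve_text_columns_py_alt
  rw [pvFoldA_eq_find]
  have hfr : fieldnames.find? pvIsRef = some fieldnames[ir] := hfindr
  have hfh : fieldnames.find? pvIsHyp = some fieldnames[ih2] := hfindh
  simp only [Option.none_or, hfr, hfh, hminr, hminh, Option.getD_some,
    PySem.List.pyGetD_natCast]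
  rw [List.getD_eq_getElem _ _ hir, List.getD_eq_getElem _ _ hih]
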